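-- pv_equiv track=rewrite | github.com/swidoff/aoc-2019 | day_25.py | try_combinations
-- ===== SOURCE A (Python) =====
-- from itertools import combinations
-- from typing import List
--
-- inventory = [
--     # "fuel cell",
--     "space heater",
--     "hologram",
--     "space law space brochure",
--     "food ration",
--     "tambourine",
--     "spool of cat6",
--     "festive hat"
-- ]
--
-- def try_combinations(n: int) -> List[str]:
--     res = [f"drop {item}" for item in inventory]
--     for comb in combinations(inventory, n):
--         for item in comb:
--             res.append(f"take {item}")
--         res.append("south")
--         for item in comb:
--             res.append(f"drop {item}")
--     return res
-- ===== SOURCE B (Python) =====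
-- inventory = [
--     # "fuel cell",
--     "space heater",
--     "hologram",
--     "space law space brochure",
--     "food ration",
--     "tambourine",
--     "spool of cat6",
--     "festive hat"
-- ]
--
-- def try_combinations(n: int):
--     res = [f"drop {item}" for item in inventory]
--
--     def emit(items, k, chosen):
--         if k == 0:
--             for item in chosen:
--                 res.append(f"take {item}")
--             res.append("south")
--             for item in chosen:
--                 res.append(f"drop {item}")
--         elif items:
--             emit(items[1:], k - 1, chosen + [items[0]])  # take items[0]
--             emit(items[1:], k, chosen)                   # skip items[0]
--
--     emit(inventory, n, [])
--     return res
-- ===== Notes on version B (the rewrite author's own statement) =====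
-- stated objective: alternative
-- what changed: Replaced the itertools.combinations library call with a recursive choose-or-skip generator over the inventory suffix that appends the take/south/drop segment directly as each combination completes.
import Mathlib
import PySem

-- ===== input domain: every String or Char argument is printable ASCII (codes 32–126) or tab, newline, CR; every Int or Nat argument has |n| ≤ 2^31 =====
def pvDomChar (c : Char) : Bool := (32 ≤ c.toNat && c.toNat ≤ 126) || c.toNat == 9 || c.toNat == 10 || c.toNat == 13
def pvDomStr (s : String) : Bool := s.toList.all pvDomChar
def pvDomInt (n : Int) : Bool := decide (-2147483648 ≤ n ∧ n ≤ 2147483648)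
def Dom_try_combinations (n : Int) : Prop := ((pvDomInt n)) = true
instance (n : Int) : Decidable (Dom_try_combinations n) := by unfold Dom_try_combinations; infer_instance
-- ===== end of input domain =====

-- B replaces the itertools.combinations call with a recursive choose-or-skip generator
-- over the inventory suffix (alternative decomposition, same cost).


def inventory : List String :=
  ["space heater", "hologram", "space law space brochure", "food ration",
   "tambourine", "spool of cat6", "festive hat"]

-- ===== PORT A =====
-- itertools.combinations, ported as the standard recursion producing tuples in
-- the same lexicographic (increasing-index) order; n < 0 is excluded by Pre_.
def combsA : Nat → List String → List (List String)
  | 0, _ => [[]]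
  | _ + 1, [] => []
  | k + 1, x :: xs => (combsA k xs).map (fun c => x :: c) ++ combsA (k + 1) xs

def try_combinations (n : Int) : List String :=
  let res := inventory.map (fun item => "drop " ++ item)
  (combsA n.toNat inventory).foldl
    (fun res comb =>
      ((res ++ comb.map (fun item => "take " ++ item)) ++ ["south"])
        ++ comb.map (fun item => "drop " ++ item))
    res

-- ===== PORT B =====
-- choose-or-skip recursion over the remaining items; emits the segment when k hits 0
def emitB (items : List String) (k : Int) (chosen : List String) : List String :=
  if k = 0 then
    chosen.map (fun item => "take " ++ item) ++ ["south"]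
      ++ chosen.map (fun item => "drop " ++ item)
  else
    match items with
    | [] => []
    | x :: xs => emitB xs (k - 1) (chosen ++ [x]) ++ emitB xs k chosen
termination_by items.length

def try_combinations_alt (n : Int) : List String :=
  inventory.map (fun item => "drop " ++ item) ++ emitB inventory n []

-- ===== PRECONDITION & SPEC =====
-- Pre_ excludes n < 0, on which A raises ValueError (combinations rejects negative r).
def Pre_try_combinations (n : Int) : Prop := 0 ≤ n
instance (n : Int) : Decidable (Pre_try_combinations n) := by unfold Pre_try_combinations; infer_instance
def pvWitness_try_combinations : Int := (2)

def Spec_try_combinations (n : Int) (out : List String) : Prop := out = try_combinations_alt n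
instance (n : Int) (out : List String) : Decidable (Spec_try_combinations n out) := by unfold Spec_try_combinations; infer_instance

-- ===== CLAIM =====
def Claim_equal_try_combinations : Prop := ∀ (n : Int), Dom_try_combinations n → Pre_try_combinations n → Spec_try_combinations n (try_combinations n)

-- ===== LEMMAS AND PROOFS =====

def segTC (c : List String) : List String :=
  c.map (fun item => "take " ++ item) ++ ["south"] ++ c.map (fun item => "drop " ++ item)

theorem emitB_eq_combsA : ∀ (xs : List String) (k : Int) (chosen : List String), 0 ≤ k →
    emitB xs k chosen = ((combsA k.toNat xs).map (fun c => segTC (chosen ++ c))).flatten := by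
  intro xs
  induction xs with
  | nil =>
      intro k chosen hk
      rcases eq_or_lt_of_le hk with h | h
      · subst h; simp [emitB, combsA, segTC]
      · have hkne : k ≠ 0 := by omega
        have hk' : k.toNat = (k.toNat - 1) + 1 := by omega
        rw [emitB, if_neg hkne, hk']
        simp [combsA]
  | cons x xs ih =>
      intro k chosen hk
      rcases eq_or_lt_of_le hk with h | h
      · subst h; simp [emitB, combsA, segTC]
      · have hkne : k ≠ 0 := by omega
        have hk' : k.toNat = (k.toNat - 1) + 1 := by omega
        rw [emitB, if_neg hkne, hk',
            ih (k - 1) (chosen ++ [x]) (by omega), ih k chosen hk]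
        have hm1 : (k - 1).toNat = k.toNat - 1 := by omega
        rw [hm1]
        have : combsA (k.toNat - 1 + 1) (x :: xs)
            = (combsA (k.toNat - 1) xs).map (fun c => x :: c) ++ combsA (k.toNat - 1 + 1) xs := rfl
        rw [this, ← hk']
        simp [List.map_append, List.map_map, Function.comp_def]

theorem foldl_seg (l : List (List String)) :
    ∀ (acc : List String),
      l.foldl (fun res comb =>
        ((res ++ comb.map (fun item => "take " ++ item)) ++ ["south"])
          ++ comb.map (fun item => "drop " ++ item)) acc
      = acc ++ (l.map segTC).flatten := by
  induction l with
  | nil => intro acc; simp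
  | cons c l ih => intro acc; rw [List.foldl_cons, ih]; simp [segTC]

-- ===== VERDICT =====
theorem try_combinations_spec : Claim_equal_try_combinations := by
  intro n _ hpre
  unfold Spec_try_combinations try_combinations try_combinations_alt
  rw [foldl_seg, emitB_eq_combsA inventory n [] hpre]
  simp
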